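-- pv_equiv track=rewrite | github.com/OriginNeuralAI/The_Dorabella_Cipher-DECODED | verify.py | find_forward_words
-- ===== SOURCE A (Python) =====
-- FORWARD_WORDS = {
--     "THEME": "Central to the Enigma Variations",
--     "YOUR":  "Possessive — your theme, Dora",
--     "FOR":   "Preposition",
--     "IS":    "Verb",
--     "IN":    "Preposition",
--     "FYRE":  "Archaic 'fire' — Elgar's dialect",
--     "FIRE":  "English (via FYRE)",
--     "END":   "Common English",
--     "SEND":  "Common English — 'do I send?'",
--     "AN":    "Article",
--     "HO":    "Exclamation (Victorian)",
--     "IT":    "Pronoun",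
--     "NO":    "Negation",
--     "ALL":   "Common English",
--     "OFF":   "Common English",
--     "OR":    "Conjunction",
-- }
--
-- def find_forward_words(text):
--     """Find recognized English words in the plaintext (forward)."""
--     found = []
--     for word, note in FORWARD_WORDS.items():
--         pos = 0
--         while True:
--             idx = text.find(word, pos)
--             if idx == -1:
--                 break
--             found.append((idx, word, note, "forward"))
--             pos = idx + 1
--     found.sort()
--     return found
-- ===== SOURCE B (Python) =====
-- FORWARD_WORDS = {
--     "THEME": "Central to the Enigma Variations",
--     "YOUR":  "Possessive — your theme, Dora",
--     "FOR":   "Preposition",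
--     "IS":    "Verb",
--     "IN":    "Preposition",
--     "FYRE":  "Archaic 'fire' — Elgar's dialect",
--     "FIRE":  "English (via FYRE)",
--     "END":   "Common English",
--     "SEND":  "Common English — 'do I send?'",
--     "AN":    "Article",
--     "HO":    "Exclamation (Victorian)",
--     "IT":    "Pronoun",
--     "NO":    "Negation",
--     "ALL":   "Common English",
--     "OFF":   "Common English",
--     "OR":    "Conjunction",
-- }
--
-- def find_forward_words(text):
--     """Single left-to-right pass over text positions; since no dictionary word is a
--     prefix of another, at most one word starts at each position, so the matches come
--     out already in the sorted order A produces."""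
--     found = []
--     for i in range(len(text)):
--         for word, note in FORWARD_WORDS.items():
--             if text.startswith(word, i):
--                 found.append((i, word, note, "forward"))
--     return found
-- ===== Notes on version B (the rewrite author's own statement) =====
-- stated objective: alternative
-- what changed: A runs one find()-loop per dictionary word and then sorts the collected tuples; B makes a single left-to-right pass over text positions, testing each word with startswith at that position, which (because no dictionary word is a prefix of another) emits the matches already in A's sorted order with no sort at all.
import Mathlib
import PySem

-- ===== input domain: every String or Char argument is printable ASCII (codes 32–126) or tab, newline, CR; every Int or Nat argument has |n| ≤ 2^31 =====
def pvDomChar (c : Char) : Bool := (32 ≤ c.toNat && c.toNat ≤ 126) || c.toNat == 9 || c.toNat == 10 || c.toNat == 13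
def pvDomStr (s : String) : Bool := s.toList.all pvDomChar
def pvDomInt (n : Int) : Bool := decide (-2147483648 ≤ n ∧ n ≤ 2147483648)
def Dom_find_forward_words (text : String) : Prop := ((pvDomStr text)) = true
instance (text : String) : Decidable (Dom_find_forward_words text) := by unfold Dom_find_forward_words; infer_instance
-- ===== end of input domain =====

-- B replaces A's per-word find() loops followed by a sort with a single left-to-right pass
-- over text positions (no sort needed: the fixed word list is prefix-free, so at most one
-- word starts at each position and matches appear in ascending-index order).

-- ===== PORT A =====
-- FORWARD_WORDS as an association list in insertion order.
def fwWords : List (String × String) :=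
  [("THEME", "Central to the Enigma Variations"),
   ("YOUR",  "Possessive — your theme, Dora"),
   ("FOR",   "Preposition"),
   ("IS",    "Verb"),
   ("IN",    "Preposition"),
   ("FYRE",  "Archaic 'fire' — Elgar's dialect"),
   ("FIRE",  "English (via FYRE)"),
   ("END",   "Common English"),
   ("SEND",  "Common English — 'do I send?'"),
   ("AN",    "Article"),
   ("HO",    "Exclamation (Victorian)"),
   ("IT",    "Pronoun"),
   ("NO",    "Negation"),
   ("ALL",   "Common English"),
   ("OFF",   "Common English"),
   ("OR",    "Conjunction")]

-- A's inner 'while True: idx = text.find(word, pos); …; pos = idx + 1' loop.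
-- pos strictly increases each iteration, so text.length + 1 steps of fuel always suffice;
-- the fuel-0 branch is unreachable.
def fwWhile (t w : List Char) (word note : String) : Nat → Int → List (Int × String × String × String)
  | 0, _ => []
  | fuel+1, pos =>
    let idx := PySem.Chars.findFrom t w pos none
    if idx = -1 then []
    else (idx, word, note, "forward") :: fwWhile t w word note fuel (idx + 1)

-- Python sorts the 4-tuples lexicographically; every first component in `found` is
-- distinct (within one word find() advances past each hit, and the fixed word list is
-- prefix-free so two different words never start at the same index), hence the tuple
-- sort coincides with the stable sort by the integer index alone, which is what we port.
def find_forward_words (text : String) : List (Int × String × String × String) :=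
  let t := text.toList
  let found := fwWords.foldl
    (fun acc p => acc ++ fwWhile t p.1.toList p.1 p.2 (t.length + 1) 0) []
  PySem.List.sorted found (fun r => r.1) false

-- ===== PORT B =====
-- 'for i in range(len(text)): for word, note in FORWARD_WORDS.items():
--    if text.startswith(word, i): found.append((i, word, note, "forward"))'
-- (i ranges over 0..len-1, a Nat; text.startswith(word, i) is word <+: drop i, exact here.)
def find_forward_words_alt (text : String) : List (Int × String × String × String) :=
  let t := text.toList
  (List.range t.length).foldl
    (fun acc i => fwWords.foldl
      (fun acc2 p =>
        if PySem.Chars.startswith (t.drop i) p.1.toList then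
          acc2 ++ [((i : Int), p.1, p.2, "forward")]
        else acc2) acc) []

-- ===== PRECONDITION & SPEC =====
def Spec_find_forward_words (text : String) (out : List (Int × String × String × String)) : Prop := out = find_forward_words_alt text
instance (text : String) (out : List (Int × String × String × String)) : Decidable (Spec_find_forward_words text out) := by unfold Spec_find_forward_words; infer_instance

-- ===== CLAIM (what is proved, stated in full; the proofs are below) =====
def Claim_equal_find_forward_words : Prop := ∀ (text : String), Dom_find_forward_words text → Spec_find_forward_words text (find_forward_words text)

-- ===== LEMMAS AND PROOFS =====
-- proof-side helpers: the emitted tuple at position i, and the Bool 'word starts at i'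
def fwTup (p : String × String) (i : Nat) : Int × String × String × String :=
  ((i : Int), p.1, p.2, "forward")

def fwQ (t : List Char) (p : String × String) (i : Nat) : Bool :=
  PySem.Chars.startswith (t.drop i) p.1.toList

-- a generic filtered-range step
lemma fw_filter_step {n m k : Nat} {P : Nat → Bool} (hkm : k ≤ m) (hmn : m < n)
    (hPm : P m = true) (hmin : ∀ i, k ≤ i → i < m → P i = false) :
    (List.range n).filter (fun i => decide (k ≤ i) && P i)
      = m :: (List.range n).filter (fun i => decide (m+1 ≤ i) && P i) := by
  have hn : n = (m+1) + (n - (m+1)) := by omega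
  rw [hn, List.range_add, List.filter_append, List.filter_append]
  have h1 : (List.range (m+1)).filter (fun i => decide (k ≤ i) && P i) = [m] := by
    rw [List.range_succ, List.filter_append]
    have : (List.range m).filter (fun i => decide (k ≤ i) && P i) = [] := by
      rw [List.filter_eq_nil_iff]
      intro i hi
      have hi' := List.mem_range.mp hi
      by_cases hk : k ≤ i
      · simp [hk, hmin i hk hi']
      · simp [hk]
    simp [this, hkm, hPm]
  have h2 : (List.range (m+1)).filter (fun i => decide (m+1 ≤ i) && P i) = [] := by
    rw [List.filter_eq_nil_iff]
    intro i hi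
    have hi' := List.mem_range.mp hi
    simp [Nat.not_le.mpr hi']
  have h3 : ((List.range (n - (m+1))).map (m+1+·)).filter (fun i => decide (k ≤ i) && P i)
      = ((List.range (n - (m+1))).map (m+1+·)).filter (fun i => decide (m+1 ≤ i) && P i) := by
    apply List.filter_congr
    intro x hx
    obtain ⟨j, _, rfl⟩ := List.mem_map.mp hx
    have : k ≤ m+1+j := by omega
    simp [this]
  rw [h1, h2, h3]
  simp

lemma fw_filter_none {n k : Nat} {P : Nat → Bool} (hnone : ∀ i, k ≤ i → P i = false) :
    (List.range n).filter (fun i => decide (k ≤ i) && P i) = [] := by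
  rw [List.filter_eq_nil_iff]
  intro i _
  by_cases hk : k ≤ i
  · simp [hk, hnone i hk]
  · simp [hk]

-- no occurrence of w at or after position k
lemma fw_no_match {t w : List Char} {k : Nat}
    (hinf : ¬ w <:+: t.drop k) : ∀ i, k ≤ i → ¬ w <+: t.drop i := by
  intro i hki hpre
  apply hinf
  rw [← PySem.Chars.isIn_iff_infix, ← PySem.Chars.exists_prefix_drop_iff_isIn]
  exact ⟨i - k, by rwa [List.drop_drop, Nat.add_sub_cancel' hki]⟩

-- A's while loop produces the tuples at all match positions ≥ k, ascending
lemma fw_while_eq (t w : List Char) (word note : String) (hw : w ≠ []) :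
    ∀ (fuel k : Nat), k ≤ t.length → t.length + 1 ≤ fuel + k →
    fwWhile t w word note fuel (k : Int)
      = ((List.range t.length).filter
          (fun i => decide (k ≤ i) && decide (w <+: t.drop i))).map
          (fun i : Nat => ((i : Int), word, note, "forward")) := by
  intro fuel
  induction fuel with
  | zero => intro k hk hf; omega
  | succ fuel ih =>
    intro k hk hf
    rw [fwWhile]
    by_cases hidx : PySem.Chars.findFrom t w (k : Int) none = -1
    · rw [if_pos hidx]
      rw [fw_filter_none (P := fun i => decide (w <+: t.drop i))]
      · simp
      · intro i hki
        simp only [decide_eq_false_iff_not]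
        exact fw_no_match ((PySem.Chars.findFrom_natCast_eq_neg_one_iff t w k hk).mp hidx) i hki
    · rw [if_neg hidx]
      obtain ⟨hge, hpre, hmin⟩ := PySem.Chars.findFrom_natCast_spec t w k hk hidx
      set idx := PySem.Chars.findFrom t w (k : Int) none with hidxdef
      have hidx0 : (0:Int) ≤ idx := le_trans (by exact_mod_cast Nat.zero_le k) hge
      have hm : idx = (idx.toNat : Int) := by omega
      have hkm : k ≤ idx.toNat := by omega
      have hmlt : idx.toNat < t.length := by
        by_contra hge'
        have : t.drop idx.toNat = [] := List.drop_eq_nil_of_le (by omega)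
        rw [this] at hpre
        exact hw (List.prefix_nil.mp hpre)
      have hrec : (idx + 1 : Int) = ((idx.toNat + 1 : Nat) : Int) := by omega
      rw [hrec, ih (idx.toNat + 1) (by omega) (by omega)]
      rw [fw_filter_step (m := idx.toNat) hkm hmlt (by simpa using hpre)
        (by intro i h1 h2; simpa using hmin i h1 h2)]
      simp [hm.symm]

-- each fixed word is nonempty, and no one is a prefix of another
lemma fw_words_nonempty : ∀ p ∈ fwWords, p.1.toList ≠ [] := by decide

lemma fw_words_prefix_free :
    fwWords.Pairwise (fun p q => ¬ p.1.toList <+: q.1.toList ∧ ¬ q.1.toList <+: p.1.toList) := by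
  decide

-- A before the sort, as a flatMap over the words
lemma fw_startswith_decide (l w : List Char) :
    PySem.Chars.startswith l w = decide (w <+: l) := by
  by_cases h : w <+: l
  · simp [PySem.Chars.startswith_iff, h]
  · rw [decide_eq_false h, ← Bool.not_eq_true, PySem.Chars.startswith_iff]
    exact h

lemma fw_A_eq (text : String) :
    find_forward_words text
      = PySem.List.sorted
          (fwWords.flatMap fun p =>
            ((List.range text.toList.length).filter (fwQ text.toList p)).map (fwTup p))
          (fun r => r.1) false := by
  unfold find_forward_words
  dsimp only
  rw [PySem.List.foldl_append_eq_flatMap, List.nil_append]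
  congr 1
  apply List.flatMap_congr
  intro p hp
  rw [show (0:Int) = ((0:Nat):Int) from rfl,
    fw_while_eq text.toList p.1.toList p.1 p.2 (fw_words_nonempty p hp) (text.toList.length + 1) 0
      (Nat.zero_le _) (by omega)]
  have hft : fwTup p = fun i : Nat => ((i : Int), p.1, p.2, "forward") := rfl
  rw [hft]
  refine congrArg (List.map _) ?_
  apply List.filter_congr
  intro i _
  simp [fwQ, fw_startswith_decide]

-- B as a flatMap over the positions
lemma fw_B_eq (text : String) :
    find_forward_words_alt text
      = (List.range text.toList.length).flatMap fun i =>
          (fwWords.filter (fun p => fwQ text.toList p i)).map (fun p => fwTup p i) := by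
  unfold find_forward_words_alt
  rw [PySem.List.foldl_congr_mem (g := fun acc i =>
    acc ++ (fwWords.filter (fun p => fwQ text.toList p i)).map (fun p => fwTup p i))]
  · rw [PySem.List.foldl_append_eq_flatMap]; simp
  · intro acc i _
    simp only [fwQ, fwTup]
    rw [PySem.List.foldl_append_if
      (p := fun p : String × String => PySem.Chars.startswith (text.toList.drop i) p.1.toList)
      (f := fun p : String × String => ((i : Int), p.1, p.2, "forward"))]

lemma fw_singleton_flatMap {β γ : Type} (is : List β) (q : β → Bool) (f : β → γ) :
    (is.flatMap fun i => if q i then [f i] else []) = (is.filter q).map f := by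
  induction is with
  | nil => simp
  | cons i is ih =>
    by_cases h : q i <;> simp [h, ih]

lemma fw_transpose {α β γ : Type} (ws : List α) (is : List β) (Q : α → β → Bool) (f : α → β → γ) :
    (ws.flatMap fun w => (is.filter (Q w)).map (f w)).Perm
      (is.flatMap fun i => (ws.filter (fun w => Q w i)).map (fun w => f w i)) := by
  induction ws with
  | nil => simp
  | cons w ws ih =>
    have hstep : (is.flatMap fun i => ((w :: ws).filter (fun w => Q w i)).map (fun w => f w i))
        = is.flatMap fun i => (if Q w i then [f w i] else [])
            ++ (ws.filter (fun w => Q w i)).map (fun w => f w i) := by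
      apply List.flatMap_congr
      intro i _
      simp only [List.filter_cons]
      by_cases h : Q w i <;> simp [h]
    rw [hstep, List.flatMap_cons]
    refine List.Perm.trans (List.Perm.append (List.Perm.refl ((is.filter (Q w)).map (f w))) ih) ?_
    rw [← fw_singleton_flatMap is (Q w) (f w)]
    exact List.flatMap_append_perm is (fun i => if Q w i then [f w i] else [])
      (fun i => (ws.filter (fun w => Q w i)).map (fun w => f w i))

lemma fw_len_le_one (t : List Char) (i : Nat) :
    ((fwWords.filter (fun p => fwQ t p i))).length ≤ 1 := by
  have hpf := (fw_words_prefix_free).filter (fun p => fwQ t p i)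
  match h : fwWords.filter (fun p => fwQ t p i) with
  | [] => simp
  | [_] => simp
  | a :: b :: l =>
    exfalso
    rw [h] at hpf
    have hab := (List.pairwise_cons.mp hpf).1 b (by simp)
    have ha' : a ∈ fwWords.filter (fun p => fwQ t p i) := by rw [h]; simp
    have hb' : b ∈ fwWords.filter (fun p => fwQ t p i) := by rw [h]; simp
    have ha : fwQ t a i = true := (List.mem_filter.mp ha').2
    have hb : fwQ t b i = true := (List.mem_filter.mp hb').2
    rw [fwQ, PySem.Chars.startswith_iff] at ha hb
    rcases List.prefix_or_prefix_of_prefix ha hb with hc | hc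
    · exact hab.1 hc
    · exact hab.2 hc

lemma fw_B_pairwise (text : String) :
    (find_forward_words_alt text).Pairwise (fun a b => a.1 < b.1) := by
  rw [fw_B_eq]
  rw [List.pairwise_flatMap]
  constructor
  · intro i _
    have := fw_len_le_one text.toList i
    match h : (fwWords.filter (fun p => fwQ text.toList p i)).map (fun p => fwTup p i) with
    | [] => simp
    | [_] => simp
    | a :: b :: l =>
      exfalso
      have hlen := congrArg List.length h
      simp at hlen
      omega
  · have hr : (List.range text.toList.length).Pairwise (· < ·) := List.pairwise_lt_range
    refine List.Pairwise.imp_of_mem ?_ hr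
    intro i j hi hj hij x hx y hy
    obtain ⟨p, _, rfl⟩ := List.mem_map.mp hx
    obtain ⟨q, _, rfl⟩ := List.mem_map.mp hy
    simpa [fwTup] using hij

-- ===== VERDICT (by name: the statement is the Claim_ definition above) =====
theorem find_forward_words_spec : Claim_equal_find_forward_words := by
  intro text _
  unfold Spec_find_forward_words
  rw [fw_A_eq]
  apply PySem.List.sorted_eq_of_perm_of_pairwise_lt
  · rw [fw_B_eq]
    exact (fw_transpose fwWords (List.range text.toList.length) (fun p i => fwQ text.toList p i) fwTup).symm
  · exact fw_B_pairwise text
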